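-- pv_equiv track=rewrite | github.com/jiturbide/python | interview/Metacareers/cafeteria.py | calculatePeople
-- ===== SOURCE A (Python) =====
-- def calculatePeople(K, spacesAvailable, edge, calculatedMap):
--   sits = 0
--   n = 1
--
--   if spacesAvailable in calculatedMap:
--     return calculatedMap[str(spacesAvailable) + str(edge)]
--
--   while True:
--     minimumPerPerson = 0
--     if edge == True:
--       minimumPerPerson = n + (n * K)
--     else:
--       minimumPerPerson = n + ((n+1) * K)
--
--     if spacesAvailable < minimumPerPerson:
--       break
--     else:
--       sits += 1
--       n += 1
--
--   calculatedMap[str(spacesAvailable) + str(edge)] = sits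
--
--   return sits
-- ===== SOURCE B (Python) =====
-- def calculatePeople(K, spacesAvailable, edge, calculatedMap):
--     # Closed form: person n needs n+(n*K) (edge) or n+((n+1)*K) spaces, so the
--     # count is the largest n with that bound <= spacesAvailable, by floor division.
--     first = (1 + K) if edge else (1 + 2 * K)
--     if spacesAvailable < first:
--         sits = 0
--     elif edge:
--         sits = spacesAvailable // (K + 1)
--     else:
--         sits = (spacesAvailable - K) // (K + 1)
--     calculatedMap[str(spacesAvailable) + str(edge)] = sits
--     return sits
-- ===== Notes on version B (the rewrite author's own statement) =====
-- stated objective: alternative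
-- what changed: Replaces A's one-by-one counting loop (one iteration per seated person) with a closed-form floor division derived from the linear inequality n*(K+1)+c <= spacesAvailable.
import Mathlib
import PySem

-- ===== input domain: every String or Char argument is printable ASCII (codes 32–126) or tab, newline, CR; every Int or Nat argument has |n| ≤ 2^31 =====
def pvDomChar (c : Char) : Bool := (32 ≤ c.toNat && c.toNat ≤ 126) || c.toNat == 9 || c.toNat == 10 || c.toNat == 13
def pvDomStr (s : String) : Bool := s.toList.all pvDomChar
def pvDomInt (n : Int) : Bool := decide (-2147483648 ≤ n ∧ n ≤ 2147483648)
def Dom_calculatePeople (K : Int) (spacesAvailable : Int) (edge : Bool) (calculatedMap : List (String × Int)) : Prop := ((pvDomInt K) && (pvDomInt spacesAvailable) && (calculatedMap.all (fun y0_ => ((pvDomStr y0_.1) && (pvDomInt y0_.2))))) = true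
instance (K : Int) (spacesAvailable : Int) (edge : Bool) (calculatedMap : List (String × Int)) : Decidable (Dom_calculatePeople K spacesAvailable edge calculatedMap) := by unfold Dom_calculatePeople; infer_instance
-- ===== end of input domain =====

-- B replaces A's per-person counting loop with a closed-form floor division (alternative algorithm);
-- return-value equivalence only: both Pythons also insert the result into calculatedMap in place.


-- ===== PORT A =====
-- A's while-True loop, as structural recursion on a fuel that is large enough on every
-- input A terminates on (Pre_ below); the same state (sits, n) and the same branch order.
def calcLoopA (K spacesAvailable : Int) (edge : Bool) : Nat → Int → Int → Int
  | 0, sits, _ => sits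
  | fuel + 1, sits, n =>
    let minimumPerPerson := if edge = true then n + (n * K) else n + ((n + 1) * K)
    if spacesAvailable < minimumPerPerson then sits
    else calcLoopA K spacesAvailable edge fuel (sits + 1) (n + 1)

-- 'if spacesAvailable in calculatedMap:' tests an int against the dict's string keys,
-- which is always False in Python, so the cached-return branch never fires; the final
-- dict insertion is a side effect on the caller's dict and does not affect the return.
def calculatePeople (K : Int) (spacesAvailable : Int) (edge : Bool) (calculatedMap : List (String × Int)) : Int :=
  calcLoopA K spacesAvailable edge (spacesAvailable.toNat + 2) 0 1

-- ===== PORT B =====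
def calculatePeople_alt (K : Int) (spacesAvailable : Int) (edge : Bool) (calculatedMap : List (String × Int)) : Int :=
  let first := if edge then 1 + K else 1 + 2 * K
  if spacesAvailable < first then 0
  else if edge then PySem.Int.floordiv spacesAvailable (K + 1)
  else PySem.Int.floordiv (spacesAvailable - K) (K + 1)

-- ===== PRECONDITION & SPEC =====
-- Exactly the inputs on which A's while-loop terminates (otherwise A diverges, returning
-- nothing): either K ≥ 0, or the very first minimum already exceeds spacesAvailable.
def Pre_calculatePeople (K : Int) (spacesAvailable : Int) (edge : Bool) (calculatedMap : List (String × Int)) : Prop :=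
  0 ≤ K ∨ spacesAvailable < (if edge then 1 + K else 1 + 2 * K)
instance (K : Int) (spacesAvailable : Int) (edge : Bool) (calculatedMap : List (String × Int)) : Decidable (Pre_calculatePeople K spacesAvailable edge calculatedMap) := by unfold Pre_calculatePeople; infer_instance

def pvWitness_calculatePeople : Int × Int × Bool × (List (String × Int)) := (2, 10, true, [])

def Spec_calculatePeople (K : Int) (spacesAvailable : Int) (edge : Bool) (calculatedMap : List (String × Int)) (out : Int) : Prop := out = calculatePeople_alt K spacesAvailable edge calculatedMap
instance (K : Int) (spacesAvailable : Int) (edge : Bool) (calculatedMap : List (String × Int)) (out : Int) : Decidable (Spec_calculatePeople K spacesAvailable edge calculatedMap out) := by unfold Spec_calculatePeople; infer_instance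

-- ===== CLAIM (what is proved, stated in full; the proofs are below) =====
def Claim_equal_calculatePeople : Prop := ∀ (K : Int) (spacesAvailable : Int) (edge : Bool) (calculatedMap : List (String × Int)), Dom_calculatePeople K spacesAvailable edge calculatedMap → Pre_calculatePeople K spacesAvailable edge calculatedMap → Spec_calculatePeople K spacesAvailable edge calculatedMap (calculatePeople K spacesAvailable edge calculatedMap)

-- ===== LEMMAS AND PROOFS =====

-- The loop invariant: with positive step d := K+1 and offset c (so the n-th minimum is
-- n*d + c), starting at n ≥ 1 with sits = n - 1 and enough fuel, the loop returns
-- max (n-1) q, where q = ⌊(S - c) / d⌋.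
theorem calcLoopA_eval (K S : Int) (edge : Bool) (hK : 0 ≤ K)
    (c : Int) (hc : c = if edge then 0 else K) :
    ∀ (fuel : Nat) (n : Int), 1 ≤ n →
      PySem.Int.floordiv (S - c) (K + 1) + 1 - n < (fuel : Int) →
      calcLoopA K S edge fuel (n - 1) n = max (n - 1) (PySem.Int.floordiv (S - c) (K + 1)) := by
  intro fuel
  induction fuel with
  | zero =>
    intro n hn hfuel
    simp only [calcLoopA]
    have : PySem.Int.floordiv (S - c) (K + 1) < n - 1 := by push_cast at hfuel; omega
    omega
  | succ fuel ih =>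
    intro n hn hfuel
    have hd : 0 < K + 1 := by omega
    have hmin : (if edge = true then n + (n * K) else n + ((n + 1) * K)) = n * (K + 1) + c := by
      cases edge <;> simp [hc] <;> ring
    have hbr : S < n * (K + 1) + c ↔ PySem.Int.floordiv (S - c) (K + 1) < n := by
      rw [PySem.Int.floordiv_lt_iff_lt_mul hd]; constructor <;> intro h <;> nlinarith
    simp only [calcLoopA, hmin]
    split_ifs with h
    · have := hbr.mp h; omega
    · have hq : n ≤ PySem.Int.floordiv (S - c) (K + 1) := by
        by_contra hx; exact h (hbr.mpr (by omega))
      have := ih (n + 1) (by omega) (by push_cast at hfuel ⊢; omega)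
      simp only [show n + 1 - 1 = n by ring] at this
      rw [show n - 1 + 1 = n by ring, this]; omega

-- ===== VERDICT (by name: the statement is the Claim_ definition above) =====
theorem calculatePeople_spec : Claim_equal_calculatePeople := by
  intro K S edge m hdom hpre
  unfold Spec_calculatePeople calculatePeople calculatePeople_alt
  set first := if edge then 1 + K else 1 + 2 * K with hfirst
  by_cases hlt : S < first
  · -- loop breaks at the first iteration; both sides give 0
    simp only [calcLoopA]
    have hmin : (if edge = true then (1:Int) + (1 * K) else 1 + ((1 + 1) * K)) = first := by
      cases edge <;> simp [hfirst] <;> ring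
    rw [if_pos hlt]
    simp only [hmin, if_pos hlt]
  · have hK : 0 ≤ K := by
      rcases hpre with h | h
      · exact h
      · exact absurd h hlt
    set c : Int := if edge then 0 else K with hc
    have hfc : first = (K + 1) + c := by cases edge <;> simp [hfirst, hc] <;> ring
    have hS : (K + 1) + c ≤ S := by rw [← hfc]; omega
    have hd : 0 < K + 1 := by omega
    have hc0 : 0 ≤ c := by cases edge <;> simp [hc] <;> omega
    have hq1 : 1 ≤ PySem.Int.floordiv (S - c) (K + 1) := by
      rw [PySem.Int.le_floordiv_iff_mul_le hd]; omega
    have hqS : PySem.Int.floordiv (S - c) (K + 1) ≤ S := by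
      have h1 : PySem.Int.floordiv (S - c) (K + 1) * (K + 1) ≤ S - c :=
        (PySem.Int.le_floordiv_iff_mul_le hd).mp le_rfl
      nlinarith
    have hSpos : 0 < S := by omega
    have hfuel : PySem.Int.floordiv (S - c) (K + 1) + 1 - 1 < ((S.toNat + 2 : Nat) : Int) := by
      push_cast; omega
    have := calcLoopA_eval K S edge hK c (by cases edge <;> simp [hc]) (S.toNat + 2) 1 le_rfl hfuel
    simp only [show (1:Int) - 1 = 0 by ring] at this
    rw [this, if_neg hlt]
    have : 0 ≤ PySem.Int.floordiv (S - c) (K + 1) := by omega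
    cases edge <;> simp [hc] at * <;> omega
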